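-- pv_equiv track=rewrite | github.com/omothm/unfence | summary.py | scan_multiline_string_lines
-- ===== SOURCE A (Python) =====
-- def scan_multiline_string_lines(cmd: str) -> tuple:
--     """
--     Return (body, closings) where:
--     - body: set of line indices (0-based) that are entirely inside a
--       multi-line quoted string (single or double).
--     - closings: dict mapping line_idx → column of the closing quote on
--       lines that terminate a multi-line string.  The prefix up to and
--       including that column is string content; everything after is shell.
--     The opening line (which starts the unclosed quote) is in neither set.
--     """
--     lines     = cmd.split("\n")
--     body: set  = set()
--     closings: dict = {}
--     in_string = None   # '"' or "'" when inside an unclosed string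
--     for i, line in enumerate(lines):
--         if in_string:
--             # Scan for the closing quote, honouring backslash escapes
--             j, closed, close_col = 0, False, -1
--             while j < len(line):
--                 c = line[j]
--                 if c == '\\':
--                     j += 2
--                     continue
--                 if c == in_string:
--                     closed     = True
--                     close_col  = j
--                     in_string  = None
--                     break
--                 j += 1
--             if closed:
--                 closings[i] = close_col
--             else:
--                 body.add(i)
--         else:
--             # Look for an unclosed opening quote on this line
--             j = 0
--             while j < len(line):
--                 c = line[j]
--                 if c == '\\':
--                     j += 2
--                     continue
--                 if c in ('"', "'"):
--                     quote = c
--                     j += 1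
--                     closed = False
--                     while j < len(line):
--                         c2 = line[j]
--                         if c2 == '\\':
--                             j += 2
--                             continue
--                         if c2 == quote:
--                             closed = True
--                             break
--                         j += 1
--                     if not closed:
--                         in_string = quote
--                         break
--                 j += 1
--     return body, closings
-- ===== SOURCE B (Python) =====
-- def scan_multiline_string_lines(cmd: str) -> tuple:
--     """Single pass over the characters of cmd with a small state machine
--     (0 = shell, 1 = candidate string opened on this line, 2 = inside a
--     multi-line string, 3 = skipping the rest of a closing line)."""
--     body: set = set()
--     closings: dict = {}
--     n = len(cmd)
--     i = 0
--     line = 0   # current line index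
--     col = 0    # column within the current line
--     state = 0
--     quote = "\0"
--     while i < n:
--         c = cmd[i]
--         if c == "\n":
--             if state == 2:
--                 body.add(line)
--             elif state == 1:
--                 state = 2
--             elif state == 3:
--                 state = 0
--             line += 1
--             col = 0
--             i += 1
--             continue
--         if state == 3:
--             i += 1
--             col += 1
--             continue
--         if c == "\\":
--             # an escape never crosses a line boundary
--             if i + 1 < n and cmd[i + 1] != "\n":
--                 i += 2
--                 col += 2
--             else:
--                 i += 1
--                 col += 1
--             continue
--         if state == 0:
--             if c == '"' or c == "'":
--                 state = 1
--                 quote = c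
--         elif state == 1:
--             if c == quote:
--                 state = 0
--         else:  # state == 2
--             if c == quote:
--                 closings[line] = col
--                 state = 3
--         i += 1
--         col += 1
--     if state == 2:
--         body.add(line)
--     return body, closings
-- ===== Notes on version B (the rewrite author's own statement) =====
-- stated objective: alternative
-- what changed: Replaces A's split-into-lines with nested per-line while loops (separate closing-scan, opening-scan and inner-closing-scan loops) by a single pass over the characters of cmd with a 4-state machine tracking line, column and the open quote.
import Mathlib
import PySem

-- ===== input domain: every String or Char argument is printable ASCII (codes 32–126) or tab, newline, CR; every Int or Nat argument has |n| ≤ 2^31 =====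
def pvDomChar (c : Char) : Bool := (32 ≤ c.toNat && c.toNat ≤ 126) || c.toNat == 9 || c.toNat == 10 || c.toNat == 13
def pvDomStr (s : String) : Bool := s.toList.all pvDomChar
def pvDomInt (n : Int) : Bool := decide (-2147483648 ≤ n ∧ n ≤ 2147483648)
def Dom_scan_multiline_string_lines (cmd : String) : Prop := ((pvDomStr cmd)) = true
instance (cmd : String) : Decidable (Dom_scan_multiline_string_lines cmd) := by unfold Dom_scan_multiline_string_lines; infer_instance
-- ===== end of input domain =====

-- B replaces A's split-into-lines + nested per-line while loops by one pass over the
-- characters with a 4-state machine (alternative decomposition, same O(n) cost).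

-- ===== PORT A =====
-- A's inner `while` of the `if in_string` branch: scan line for the closing quote,
-- `'\\'` advances two columns; returns the closing column, none if unclosed.
def scanClose (q : Char) : List Char → Int → Option Int
  | [], _ => none
  | c :: rest, j =>
    if c = '\\' then
      match rest with
      | [] => none
      | _ :: r2 => scanClose q r2 (j + 2)
    else if c = q then some j
    else scanClose q rest (j + 1)

-- A's innermost `while`: scan for the quote closing a candidate opened on this line;
-- returns the rest of the line after the closing quote (A's `j += 1` after `break`).
def scanInner (q : Char) : List Char → Option (List Char)
  | [] => none
  | c :: rest =>
    if c = '\\' then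
      match rest with
      | [] => none
      | _ :: r2 => scanInner q r2
    else if c = q then some rest
    else scanInner q rest

-- termination fact for scanOpen (the outer loop resumes after a closed pair)
lemma scanInner_length (q : Char) : ∀ (l rem : List Char),
    scanInner q l = some rem → rem.length < l.length := by
  intro l
  induction l using scanInner.induct q with
  | case1 => intro rem h2; simp [scanInner] at h2
  | case2 => intro rem h2; simp [scanInner] at h2
  | case3 c r2 ih =>
    intro rem h2
    simp only [scanInner] at h2
    have := ih rem h2
    simp; omega
  | case4 =>
    rename_i r2 hnb
    intro rem h2
    rw [scanInner.eq_def] at h2; simp [hnb] at h2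
    subst h2; simp
  | case5 =>
    rename_i c r2 hnb hnq ih
    intro rem h2
    rw [scanInner.eq_def] at h2; simp [hnb, hnq] at h2
    have := ih rem h2
    simp; omega

-- A's `else` branch outer `while`: look for an unclosed opening quote on the line.
def scanOpen : List Char → Option Char
  | [] => none
  | c :: rest =>
    if c = '\\' then
      match rest with
      | [] => none
      | _ :: r2 => scanOpen r2
    else if c = '"' ∨ c = '\'' then
      match h : scanInner c rest with
      | some rem => scanOpen rem
      | none => some c
    else scanOpen rest
termination_by l => l.length
decreasing_by
  · simp
  · have := scanInner_length c rest rem h; simp; omega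
  · simp

-- A's `for i, line in enumerate(lines)` with state `in_string`.
def aLoop : List (List Char) → Int → Option Char → PySem.Set Int → PySem.Dict Int Int →
    List Int × List (Int × Int)
  | [], _, _, body, closings => (body, closings.items)
  | line :: rest, i, inStr, body, closings =>
    match inStr with
    | some q =>
      match scanClose q line 0 with
      | some col => aLoop rest (i + 1) none body (closings.insert i col)
      | none => aLoop rest (i + 1) (some q) (PySem.Set.add body i) closings
    | none => aLoop rest (i + 1) (scanOpen line) body closings

def scan_multiline_string_lines (cmd : String) : List Int × (List (Int × Int)) :=
  -- cmd.split("\n"): PySem.Chars.splitOn on the char list (sep nonempty, so exact)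
  aLoop (PySem.Chars.splitOn cmd.toList ['\n']) 0 none PySem.Set.empty PySem.Dict.empty

-- ===== PORT B =====
-- Source B's single `while i < n` loop: state 0 = shell, 1 = candidate opened on this
-- line, 2 = inside a multi-line string, 3 = skipping the rest of a closing line.
def bRun : List Char → Int → Int → Int → Char → PySem.Set Int → PySem.Dict Int Int →
    List Int × List (Int × Int)
  | [], line, _, state, _, body, closings =>
    ((if state = 2 then PySem.Set.add body line else body), closings.items)
  | c :: rest, line, col, state, quote, body, closings =>
    if c = '\n' then
      if state = 2 then bRun rest (line + 1) 0 2 quote (PySem.Set.add body line) closings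
      else if state = 1 then bRun rest (line + 1) 0 2 quote body closings
      else if state = 3 then bRun rest (line + 1) 0 0 quote body closings
      else bRun rest (line + 1) 0 state quote body closings
    else if state = 3 then bRun rest line (col + 1) 3 quote body closings
    else if c = '\\' then
      match rest with
      | c2 :: r2 =>
        if c2 = '\n' then bRun (c2 :: r2) line (col + 1) state quote body closings
        else bRun r2 line (col + 2) state quote body closings
      | [] => bRun [] line (col + 1) state quote body closings
    else if state = 0 then
      if c = '"' ∨ c = '\'' then bRun rest line (col + 1) 1 c body closings
      else bRun rest line (col + 1) 0 quote body closings
    else if state = 1 then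
      if c = quote then bRun rest line (col + 1) 0 quote body closings
      else bRun rest line (col + 1) 1 quote body closings
    else
      if c = quote then bRun rest line (col + 1) 3 quote body (closings.insert line col)
      else bRun rest line (col + 1) 2 quote body closings
termination_by cs => cs.length
decreasing_by all_goals simp <;> omega

def scan_multiline_string_lines_alt (cmd : String) : List Int × (List (Int × Int)) :=
  bRun cmd.toList 0 0 0 (Char.ofNat 0) PySem.Set.empty PySem.Dict.empty

-- ===== PRECONDITION & SPEC =====
def Spec_scan_multiline_string_lines (cmd : String) (out : List Int × (List (Int × Int))) : Prop := out = scan_multiline_string_lines_alt cmd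
instance (cmd : String) (out : List Int × (List (Int × Int))) : Decidable (Spec_scan_multiline_string_lines cmd out) := by unfold Spec_scan_multiline_string_lines; infer_instance

-- ===== CLAIM (what is proved, stated in full; the proofs are below) =====
def Claim_equal_scan_multiline_string_lines : Prop := ∀ (cmd : String), Dom_scan_multiline_string_lines cmd → Spec_scan_multiline_string_lines cmd (scan_multiline_string_lines cmd)

-- ===== LEMMAS AND PROOFS =====

-- reference splitting of a char list on '\n'
def mySplit : List Char → List (List Char)
  | [] => [[]]
  | c :: r => if c = '\n' then [] :: mySplit r else (mySplit r).modifyHead (c :: ·)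

-- inverse of mySplit: rejoin the lines with '\n'
def glue : List (List Char) → List Char
  | [] => []
  | [l] => l
  | l :: l2 :: ls => l ++ '\n' :: glue (l2 :: ls)

lemma mySplit_ne_nil (s : List Char) : mySplit s ≠ [] := by
  induction s with
  | nil => simp [mySplit]
  | cons c r ih =>
    simp only [mySplit]
    split_ifs
    · simp
    · cases h : mySplit r with
      | nil => exact absurd h ih
      | cons a t => simp [h]


lemma glue_mySplit (s : List Char) : glue (mySplit s) = s := by
  induction s with
  | nil => simp [mySplit, glue]
  | cons c r ih =>
    simp only [mySplit]
    split_ifs with hc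
    · subst hc
      cases h : mySplit r with
      | nil => exact absurd h (mySplit_ne_nil r)
      | cons a t => rw [h] at ih; simp [glue, ih]
    · cases h : mySplit r with
      | nil => exact absurd h (mySplit_ne_nil r)
      | cons a t =>
        rw [h] at ih
        cases t with
        | nil => simp [glue] at ih ⊢; simp [ih]
        | cons b t2 => simp [glue] at ih ⊢; simp [ih]


lemma mySplit_nlfree (s : List Char) : ∀ l ∈ mySplit s, '\n' ∉ l := by
  induction s with
  | nil => simp [mySplit]
  | cons c r ih =>
    simp only [mySplit]
    split_ifs with hc
    · intro l hl
      simp at hl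
      rcases hl with h | h
      · simp [h]
      · exact ih l h
    · cases h : mySplit r with
      | nil => exact absurd h (mySplit_ne_nil r)
      | cons a t =>
        intro l hl
        simp [h] at hl
        rcases hl with h1 | h1
        · subst h1
          have := ih a (by simp [h])
          simp [this, Ne.symm hc]
        · exact ih l (by simp [h, h1])


lemma go_eq : ∀ (fuel : Nat) (l cur : List Char) (acc : List (List Char)), l.length < fuel →
    PySem.Chars.splitOn.go ['\n'] fuel l cur acc =
      acc.reverse ++ (mySplit l).modifyHead (cur.reverse ++ ·) := by
  intro fuel
  induction fuel with
  | zero => intro l cur acc h; omega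
  | succ n ih =>
    intro l cur acc h
    cases l with
    | nil => simp [PySem.Chars.splitOn.go, mySplit]
    | cons c rest =>
      rw [PySem.Chars.splitOn.go]
      by_cases hc : c = '\n'
      · subst hc
        have hp : List.isPrefixOf ['\n'] ('\n' :: rest) = true := by simp [List.isPrefixOf]
        rw [if_pos hp]
        simp only [List.length_singleton, List.drop_succ_cons, List.drop_zero]
        rw [ih rest [] _ (by simp at h ⊢; omega)]
        simp only [mySplit, if_pos rfl]
        cases hm : mySplit rest with
        | nil => exact absurd hm (mySplit_ne_nil rest)
        | cons a t => simp
      · have hp : List.isPrefixOf ['\n'] (c :: rest) = false := by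
          simp [List.isPrefixOf]; exact fun hh => absurd hh.symm hc
        rw [if_neg (by simp [hp])]
        rw [ih rest (c :: cur) acc (by simp at h ⊢; omega)]
        simp only [mySplit, if_neg hc]
        cases hm : mySplit rest with
        | nil => exact absurd hm (mySplit_ne_nil rest)
        | cons a t => simp

lemma splitOn_eq_mySplit (s : List Char) : PySem.Chars.splitOn s ['\n'] = mySplit s := by
  rw [PySem.Chars.splitOn, go_eq (s.length + 1) s [] [] (by omega)]
  cases hm : mySplit s with
  | nil => exact absurd hm (mySplit_ne_nil s)
  | cons a t => simp


-- in states 0 and 1 the column is never read, and in state 0 neither is the quote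
-- one-step unfolding facts for bRun (proof convenience)
lemma bRun_nil (line col state : Int) (quote : Char) (body : PySem.Set Int)
    (closings : PySem.Dict Int Int) :
    bRun [] line col state quote body closings =
      ((if state = 2 then PySem.Set.add body line else body), closings.items) := by
  rw [bRun.eq_def]

lemma sNL {st : Int} {ch : Char} (h : ch = '\n') :
    ∀ (rest : List Char) (line col : Int) (q : Char) (b : PySem.Set Int) (c : PySem.Dict Int Int),
    bRun (ch :: rest) line col st q b c =
      if st = 2 then bRun rest (line + 1) 0 2 q (PySem.Set.add b line) c
      else if st = 1 then bRun rest (line + 1) 0 2 q b c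
      else if st = 3 then bRun rest (line + 1) 0 0 q b c
      else bRun rest (line + 1) 0 st q b c := by
  intro rest line col q b c
  rw [bRun.eq_def]; simp [h]

lemma sSkip {ch : Char} (h : ch ≠ '\n') :
    ∀ (rest : List Char) (line col : Int) (q : Char) (b : PySem.Set Int) (c : PySem.Dict Int Int),
    bRun (ch :: rest) line col 3 q b c = bRun rest line (col + 1) 3 q b c := by
  intro rest line col q b c
  rw [bRun.eq_def]; simp [h]

lemma sBsNilR {st : Int} (hst : st ≠ 3) :
    ∀ (line col : Int) (q : Char) (b : PySem.Set Int) (c : PySem.Dict Int Int),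
    bRun ['\\'] line col st q b c =
      ((if st = 2 then PySem.Set.add b line else b), c.items) := by
  intro line col q b c
  rw [bRun.eq_def]; simp [hst, bRun_nil]

lemma sBsNl {st : Int} {c2 : Char} (hst : st ≠ 3) (h3 : c2 = '\n') :
    ∀ (r2 : List Char) (line col : Int) (q : Char) (b : PySem.Set Int) (c : PySem.Dict Int Int),
    bRun ('\\' :: c2 :: r2) line col st q b c = bRun (c2 :: r2) line (col + 1) st q b c := by
  intro r2 line col q b c
  rw [bRun.eq_def]; simp [hst, h3]

lemma sBs {st : Int} {c2 : Char} (hst : st ≠ 3) (h3 : c2 ≠ '\n') :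
    ∀ (r2 : List Char) (line col : Int) (q : Char) (b : PySem.Set Int) (c : PySem.Dict Int Int),
    bRun ('\\' :: c2 :: r2) line col st q b c = bRun r2 line (col + 2) st q b c := by
  intro r2 line col q b c
  rw [bRun.eq_def]; simp [hst, h3]

lemma sQuote {ch : Char} (h1 : ch = '"' ∨ ch = '\'') :
    ∀ (rest : List Char) (line col : Int) (q : Char) (b : PySem.Set Int) (c : PySem.Dict Int Int),
    bRun (ch :: rest) line col 0 q b c = bRun rest line (col + 1) 1 ch b c := by
  intro rest line col q b c
  rcases h1 with h | h <;> subst h <;> (rw [bRun.eq_def]; simp)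

lemma sShell {ch : Char} (h1 : ch ≠ '\n') (h2 : ch ≠ '\\') (h3 : ¬(ch = '"' ∨ ch = '\'')) :
    ∀ (rest : List Char) (line col : Int) (q : Char) (b : PySem.Set Int) (c : PySem.Dict Int Int),
    bRun (ch :: rest) line col 0 q b c = bRun rest line (col + 1) 0 q b c := by
  intro rest line col q b c
  rw [bRun.eq_def]; simp [h1, h2, h3]

lemma sCandClose {ch : Char} (h1 : ch ≠ '\n') (h2 : ch ≠ '\\') :
    ∀ (rest : List Char) (line col : Int) (b : PySem.Set Int) (c : PySem.Dict Int Int),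
    bRun (ch :: rest) line col 1 ch b c = bRun rest line (col + 1) 0 ch b c := by
  intro rest line col b c
  rw [bRun.eq_def]; simp [h1, h2]

lemma sCand {ch q : Char} (h1 : ch ≠ '\n') (h2 : ch ≠ '\\') (h4 : ch ≠ q) :
    ∀ (rest : List Char) (line col : Int) (b : PySem.Set Int) (c : PySem.Dict Int Int),
    bRun (ch :: rest) line col 1 q b c = bRun rest line (col + 1) 1 q b c := by
  intro rest line col b c
  rw [bRun.eq_def]; simp [h1, h2, h4]

lemma sInsClose {ch : Char} (h1 : ch ≠ '\n') (h2 : ch ≠ '\\') :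
    ∀ (rest : List Char) (line col : Int) (b : PySem.Set Int) (c : PySem.Dict Int Int),
    bRun (ch :: rest) line col 2 ch b c = bRun rest line (col + 1) 3 ch b (c.insert line col) := by
  intro rest line col b c
  rw [bRun.eq_def]; simp [h1, h2]

lemma sIns {ch q : Char} (h1 : ch ≠ '\n') (h2 : ch ≠ '\\') (h4 : ch ≠ q) :
    ∀ (rest : List Char) (line col : Int) (b : PySem.Set Int) (c : PySem.Dict Int Int),
    bRun (ch :: rest) line col 2 q b c = bRun rest line (col + 1) 2 q b c := by
  intro rest line col b c
  rw [bRun.eq_def]; simp [h1, h2, h4]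

-- in states 0 and 1 the column is never read, and in state 0 neither is the quote
lemma irrel01 : ∀ (n : Nat) (cs : List Char), cs.length ≤ n →
    ∀ (line col col' : Int) (b : PySem.Set Int) (c : PySem.Dict Int Int),
    (∀ q q', bRun cs line col 0 q b c = bRun cs line col' 0 q' b c) ∧
    (∀ q, bRun cs line col 1 q b c = bRun cs line col' 1 q b c) := by
  intro n
  induction n with
  | zero =>
    intro cs h line col col' b c
    have : cs = [] := by cases cs <;> simp_all
    subst this
    constructor <;> intro _ <;> simp [bRun_nil]
  | succ n ih =>
    intro cs h line col col' b c
    cases cs with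
    | nil => constructor <;> intro _ <;> simp [bRun_nil]
    | cons ch rest =>
      constructor
      · intro q q'
        by_cases h1 : ch = '\n'
        · simp only [sNL h1]; norm_num
          exact (ih rest (by simp at h; omega) (line + 1) 0 0 b c).1 q q'
        · by_cases h2 : ch = '\\'
          · subst h2
            cases rest with
            | nil => rw [sBsNilR (by norm_num), sBsNilR (by norm_num)]
            | cons c2 r2 =>
              by_cases h3 : c2 = '\n'
              · simp only [sBsNl (by norm_num : (0:Int) ≠ 3) h3]
                exact (ih (c2 :: r2) (by simp at h ⊢; omega) line (col + 1) (col' + 1) b c).1 q q'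
              · simp only [sBs (by norm_num : (0:Int) ≠ 3) h3]
                exact (ih r2 (by simp at h ⊢; omega) line (col + 2) (col' + 2) b c).1 q q'
          · by_cases h4 : ch = '"' ∨ ch = '\''
            · simp only [sQuote h4]
              exact (ih rest (by simp at h; omega) line (col + 1) (col' + 1) b c).2 ch
            · simp only [sShell h1 h2 h4]
              exact (ih rest (by simp at h; omega) line (col + 1) (col' + 1) b c).1 q q'
      · intro q
        by_cases h1 : ch = '\n'
        · simp only [sNL h1]
        · by_cases h2 : ch = '\\'
          · subst h2
            cases rest with
            | nil => rw [sBsNilR (by norm_num), sBsNilR (by norm_num)]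
            | cons c2 r2 =>
              by_cases h3 : c2 = '\n'
              · simp only [sBsNl (by norm_num : (1:Int) ≠ 3) h3]
                exact (ih (c2 :: r2) (by simp at h ⊢; omega) line (col + 1) (col' + 1) b c).2 q
              · simp only [sBs (by norm_num : (1:Int) ≠ 3) h3]
                exact (ih r2 (by simp at h ⊢; omega) line (col + 2) (col' + 2) b c).2 q
          · by_cases h4 : ch = q
            · subst h4
              simp only [sCandClose h1 h2]
              exact (ih rest (by simp at h; omega) line (col + 1) (col' + 1) b c).1 ch ch
            · simp only [sCand h1 h2 h4]
              exact (ih rest (by simp at h; omega) line (col + 1) (col' + 1) b c).2 q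

-- state 3 also ignores the column and the quote
lemma irrel3 : ∀ (n : Nat) (cs : List Char), cs.length ≤ n →
    ∀ (line col col' : Int) (q q' : Char) (b : PySem.Set Int) (c : PySem.Dict Int Int),
    bRun cs line col 3 q b c = bRun cs line col' 3 q' b c := by
  intro n
  induction n with
  | zero =>
    intro cs h line col col' q q' b c
    have : cs = [] := by cases cs <;> simp_all
    subst this
    simp [bRun_nil]
  | succ n ih =>
    intro cs h line col col' q q' b c
    cases cs with
    | nil => simp [bRun_nil]
    | cons ch rest =>
      by_cases h1 : ch = '\n'
      · simp only [sNL h1]; norm_num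
        exact (irrel01 rest.length rest le_rfl (line + 1) 0 0 b c).1 q q'
      · simp only [sSkip h1]
        exact ih rest (by simp at h; omega) line (col + 1) (col' + 1) q q' b c

-- state 3 ignores everything on the line (and column and quote)
lemma skipRun : ∀ (l : List Char), (∀ x ∈ l, x ≠ '\n') →
    ∀ (rest : List Char) (line col col' : Int) (q q' : Char) (b : PySem.Set Int)
      (c : PySem.Dict Int Int),
    bRun (l ++ rest) line col 3 q b c = bRun rest line col' 3 q' b c := by
  intro l
  induction l with
  | nil =>
    intro _ rest line col col' q q' b c
    exact irrel3 rest.length rest le_rfl line col col' q q' b c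
  | cons ch r ihl =>
    intro hf rest line col col' q q' b c
    have h1 : ch ≠ '\n' := hf ch (by simp)
    rw [List.cons_append]
    simp only [sSkip h1]
    exact ihl (fun x hx => hf x (by simp [hx])) rest line (col + 1) col' q q' b c


-- unfolding facts for scanClose
lemma scanClose_bs (q c2 : Char) (r2 : List Char) (j : Int) :
    scanClose q ('\\' :: c2 :: r2) j = scanClose q r2 (j + 2) := by
  simp [scanClose]

lemma scanClose_close {q : Char} (h : q ≠ '\\') (rest : List Char) (j : Int) :
    scanClose q (q :: rest) j = some j := by
  rw [scanClose.eq_def]; simp [h]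

lemma scanClose_other {q ch : Char} (h1 : ch ≠ '\\') (h2 : ch ≠ q) (rest : List Char) (j : Int) :
    scanClose q (ch :: rest) j = scanClose q rest (j + 1) := by
  rw [scanClose.eq_def]; simp [h1, h2]

-- a final line entered in state 2 behaves like A's `if in_string` branch
lemma instrEnd : ∀ (n : Nat) (l : List Char), l.length ≤ n → (∀ x ∈ l, x ≠ '\n') →
    ∀ (line col : Int) (q : Char) (b : PySem.Set Int) (c : PySem.Dict Int Int),
    bRun l line col 2 q b c =
      match scanClose q l col with
      | some cc => (b, (c.insert line cc).items)
      | none => (PySem.Set.add b line, c.items) := by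
  intro n
  induction n with
  | zero =>
    intro l h hf line col q b c
    have : l = [] := by cases l <;> simp_all
    subst this
    simp [bRun_nil, scanClose]
  | succ n ih =>
    intro l h hf line col q b c
    cases l with
    | nil => simp [bRun_nil, scanClose]
    | cons ch rest =>
      have h1 : ch ≠ '\n' := hf ch (by simp)
      by_cases h2 : ch = '\\'
      · subst h2
        cases rest with
        | nil =>
          rw [sBsNilR (by norm_num)]
          simp [scanClose]
        | cons c2 r2 =>
          have h3 : c2 ≠ '\n' := hf c2 (by simp)
          rw [sBs (by norm_num) h3]
          rw [ih r2 (by simp at h ⊢; omega) (fun x hx => hf x (by simp [hx])) line (col + 2) q b c]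
          rw [scanClose_bs]
      · by_cases h4 : ch = q
        · subst h4
          rw [sInsClose h1 h2]
          have := skipRun rest (fun x hx => hf x (by simp [hx])) [] line (col + 1) 0 ch ch b (c.insert line col)
          rw [List.append_nil] at this
          rw [this, bRun_nil]
          rw [scanClose_close h2]
          simp
        · rw [sIns h1 h2 h4]
          rw [ih rest (by simp at h; omega) (fun x hx => hf x (by simp [hx])) line (col + 1) q b c]
          rw [scanClose_other h2 h4]

-- a non-final line entered in state 2 behaves like A's `if in_string` branch
lemma instrNL : ∀ (n : Nat) (l : List Char), l.length ≤ n → (∀ x ∈ l, x ≠ '\n') →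
    ∀ (r : List Char) (line col : Int) (q : Char) (b : PySem.Set Int) (c : PySem.Dict Int Int),
    bRun (l ++ '\n' :: r) line col 2 q b c =
      match scanClose q l col with
      | some cc => bRun r (line + 1) 0 0 q b (c.insert line cc)
      | none => bRun r (line + 1) 0 2 q (PySem.Set.add b line) c := by
  intro n
  induction n with
  | zero =>
    intro l h hf r line col q b c
    have : l = [] := by cases l <;> simp_all
    subst this
    simp only [List.nil_append, sNL rfl, scanClose]
    norm_num
  | succ n ih =>
    intro l h hf r line col q b c
    cases l with
    | nil =>
      simp only [List.nil_append, sNL rfl, scanClose]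
      norm_num
    | cons ch rest =>
      have h1 : ch ≠ '\n' := hf ch (by simp)
      rw [List.cons_append]
      by_cases h2 : ch = '\\'
      · subst h2
        cases rest with
        | nil =>
          simp only [List.nil_append]
          rw [sBsNl (by norm_num) rfl]
          simp only [sNL rfl]
          norm_num
          simp [scanClose]
        | cons c2 r2 =>
          have h3 : c2 ≠ '\n' := hf c2 (by simp)
          rw [List.cons_append] at *
          rw [sBs (by norm_num) h3]
          rw [ih r2 (by simp at h ⊢; omega) (fun x hx => hf x (by simp [hx])) r line (col + 2) q b c]
          rw [scanClose_bs]
      · by_cases h4 : ch = q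
        · subst h4
          rw [sInsClose h1 h2]
          rw [skipRun rest (fun x hx => hf x (by simp [hx])) ('\n' :: r) line (col + 1) 0 ch ch b (c.insert line col)]
          simp only [sNL rfl]
          norm_num
          rw [scanClose_close h2]
        · rw [sIns h1 h2 h4]
          rw [ih rest (by simp at h; omega) (fun x hx => hf x (by simp [hx])) r line (col + 1) q b c]
          rw [scanClose_other h2 h4]


-- unfolding facts for scanInner and scanOpen
lemma scanInner_nil (q : Char) : scanInner q [] = none := rfl

lemma scanInner_bs1 (q : Char) : scanInner q ['\\'] = none := by
  rw [scanInner.eq_def]; simp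

lemma scanInner_bs (q c2 : Char) (r2 : List Char) :
    scanInner q ('\\' :: c2 :: r2) = scanInner q r2 := by
  rw [scanInner.eq_def]; simp

lemma scanInner_close {q : Char} (h : q ≠ '\\') (rest : List Char) :
    scanInner q (q :: rest) = some rest := by
  rw [scanInner.eq_def]; simp [h]

lemma scanInner_other {q ch : Char} (h1 : ch ≠ '\\') (h2 : ch ≠ q) (rest : List Char) :
    scanInner q (ch :: rest) = scanInner q rest := by
  rw [scanInner.eq_def]; simp [h1, h2]

lemma scanInner_mem (q : Char) : ∀ (l rem : List Char),
    scanInner q l = some rem → ∀ x ∈ rem, x ∈ l := by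
  intro l
  induction l using scanInner.induct q with
  | case1 => intro rem h2; simp [scanInner] at h2
  | case2 => intro rem h2; simp [scanInner_bs1] at h2
  | case3 c r2 ih =>
    intro rem h2
    rw [scanInner_bs] at h2
    intro x hx
    simp [ih rem h2 x hx]
  | case4 =>
    rename_i r2 hnb
    intro rem h2
    rw [scanInner_close hnb] at h2
    simp at h2
    subst h2
    intro x hx; simp [hx]
  | case5 =>
    rename_i c r2 hnb hnq ih
    intro rem h2
    rw [scanInner_other hnb hnq] at h2
    intro x hx
    simp [ih rem h2 x hx]

lemma scanOpen_nil : scanOpen [] = none := by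
  rw [scanOpen.eq_def]

lemma scanOpen_bs1 : scanOpen ['\\'] = none := by
  rw [scanOpen.eq_def]; simp

lemma scanOpen_bs (c2 : Char) (r2 : List Char) :
    scanOpen ('\\' :: c2 :: r2) = scanOpen r2 := by
  rw [scanOpen.eq_def]; simp

lemma scanOpen_quote {ch : Char} (h1 : ch = '"' ∨ ch = '\'') (rest : List Char) :
    scanOpen (ch :: rest) =
      (match scanInner ch rest with
       | some rem => scanOpen rem
       | none => some ch) := by
  rcases h1 with h | h <;> subst h <;>
    (rw [scanOpen.eq_def]; simp; cases hsi : scanInner _ rest <;> simp [hsi])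

lemma scanOpen_other {ch : Char} (h2 : ch ≠ '\\') (h4 : ¬(ch = '"' ∨ ch = '\'')) (rest : List Char) :
    scanOpen (ch :: rest) = scanOpen rest := by
  rw [scanOpen.eq_def]; simp [h2, h4]

-- a final line entered in state 0 or 1 records nothing
lemma endRun : ∀ (n : Nat) (l : List Char), l.length ≤ n → (∀ x ∈ l, x ≠ '\n') →
    ∀ (line col : Int) (b : PySem.Set Int) (c : PySem.Dict Int Int),
    (∀ q, bRun l line col 0 q b c = (b, c.items)) ∧
    (∀ q, bRun l line col 1 q b c = (b, c.items)) := by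
  intro n
  induction n with
  | zero =>
    intro l h hf line col b c
    have : l = [] := by cases l <;> simp_all
    subst this
    constructor <;> intro q <;> simp [bRun_nil]
  | succ n ih =>
    intro l h hf line col b c
    cases l with
    | nil => constructor <;> intro q <;> simp [bRun_nil]
    | cons ch rest =>
      have h1 : ch ≠ '\n' := hf ch (by simp)
      constructor
      · intro q
        by_cases h2 : ch = '\\'
        · subst h2
          cases rest with
          | nil => rw [sBsNilR (by norm_num)]; norm_num
          | cons c2 r2 =>
            have h3 : c2 ≠ '\n' := hf c2 (by simp)
            rw [sBs (by norm_num) h3]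
            exact (ih r2 (by simp at h ⊢; omega) (fun x hx => hf x (by simp [hx])) line (col + 2) b c).1 q
        · by_cases h4 : ch = '"' ∨ ch = '\''
          · rw [sQuote h4]
            exact (ih rest (by simp at h; omega) (fun x hx => hf x (by simp [hx])) line (col + 1) b c).2 ch
          · rw [sShell h1 h2 h4]
            exact (ih rest (by simp at h; omega) (fun x hx => hf x (by simp [hx])) line (col + 1) b c).1 q
      · intro q
        by_cases h2 : ch = '\\'
        · subst h2
          cases rest with
          | nil => rw [sBsNilR (by norm_num)]; norm_num
          | cons c2 r2 =>
            have h3 : c2 ≠ '\n' := hf c2 (by simp)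
            rw [sBs (by norm_num) h3]
            exact (ih r2 (by simp at h ⊢; omega) (fun x hx => hf x (by simp [hx])) line (col + 2) b c).2 q
        · by_cases h4 : ch = q
          · subst h4
            rw [sCandClose h1 h2]
            exact (ih rest (by simp at h; omega) (fun x hx => hf x (by simp [hx])) line (col + 1) b c).1 ch
          · rw [sCand h1 h2 h4]
            exact (ih rest (by simp at h; omega) (fun x hx => hf x (by simp [hx])) line (col + 1) b c).2 q

-- a non-final line entered in state 0 (resp. 1) behaves like A's `else` branch
lemma nlRun : ∀ (n : Nat) (l : List Char), l.length ≤ n → (∀ x ∈ l, x ≠ '\n') →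
    ∀ (r : List Char) (line col : Int) (b : PySem.Set Int) (c : PySem.Dict Int Int),
    (∀ q, bRun (l ++ '\n' :: r) line col 0 q b c =
      match scanOpen l with
      | none => bRun r (line + 1) 0 0 q b c
      | some qq => bRun r (line + 1) 0 2 qq b c) ∧
    (∀ q, bRun (l ++ '\n' :: r) line col 1 q b c =
      match scanInner q l with
      | some rem => bRun (rem ++ '\n' :: r) line 0 0 q b c
      | none => bRun r (line + 1) 0 2 q b c) := by
  intro n
  induction n with
  | zero =>
    intro l h hf r line col b c
    have : l = [] := by cases l <;> simp_all
    subst this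
    constructor <;> intro q <;> (simp only [List.nil_append, sNL rfl]; norm_num; simp [scanOpen_nil, scanInner_nil])
  | succ n ih =>
    intro l h hf r line col b c
    cases l with
    | nil =>
      constructor <;> intro q <;> (simp only [List.nil_append, sNL rfl]; norm_num; simp [scanOpen_nil, scanInner_nil])
    | cons ch rest =>
      have h1 : ch ≠ '\n' := hf ch (by simp)
      constructor
      · intro q
        rw [List.cons_append]
        by_cases h2 : ch = '\\'
        · subst h2
          cases rest with
          | nil =>
            simp only [List.nil_append]
            rw [sBsNl (by norm_num) rfl]
            simp only [sNL rfl]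
            norm_num
            rw [scanOpen_bs1]
          | cons c2 r2 =>
            have h3 : c2 ≠ '\n' := hf c2 (by simp)
            rw [List.cons_append, sBs (by norm_num) h3]
            rw [scanOpen_bs]
            exact (ih r2 (by simp at h ⊢; omega) (fun x hx => hf x (by simp [hx])) r line (col + 2) b c).1 q
        · by_cases h4 : ch = '"' ∨ ch = '\''
          · rw [sQuote h4]
            rw [(ih rest (by simp at h; omega) (fun x hx => hf x (by simp [hx])) r line (col + 1) b c).2 ch]
            rw [scanOpen_quote h4]
            cases hsi : scanInner ch rest with
            | none => simp
            | some rem =>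
              simp only
              have hrem_len : rem.length ≤ n := by
                have := scanInner_length ch rest rem hsi
                simp at h; omega
              have hrem_f : ∀ x ∈ rem, x ≠ '\n' := fun x hx =>
                hf x (by simp [scanInner_mem ch rest rem hsi x hx])
              rw [(ih rem hrem_len hrem_f r line 0 b c).1 ch]
              cases hso : scanOpen rem with
              | none =>
                simp only
                exact (irrel01 r.length r le_rfl (line + 1) 0 0 b c).1 ch q
              | some qq => simp
          · rw [sShell h1 h2 h4]
            rw [scanOpen_other h2 h4]
            exact (ih rest (by simp at h; omega) (fun x hx => hf x (by simp [hx])) r line (col + 1) b c).1 q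
      · intro q
        rw [List.cons_append]
        by_cases h2 : ch = '\\'
        · subst h2
          cases rest with
          | nil =>
            simp only [List.nil_append]
            rw [sBsNl (by norm_num) rfl]
            simp only [sNL rfl]
            norm_num
            rw [scanInner_bs1]
          | cons c2 r2 =>
            have h3 : c2 ≠ '\n' := hf c2 (by simp)
            rw [List.cons_append, sBs (by norm_num) h3]
            rw [scanInner_bs]
            exact (ih r2 (by simp at h ⊢; omega) (fun x hx => hf x (by simp [hx])) r line (col + 2) b c).2 q
        · by_cases h4 : ch = q
          · subst h4
            rw [sCandClose h1 h2]
            rw [scanInner_close h2]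
            simp only
            exact (irrel01 (rest ++ '\n' :: r).length _ le_rfl line (col + 1) 0 b c).1 ch ch
          · rw [sCand h1 h2 h4]
            rw [scanInner_other h2 (fun hh => h4 hh)]
            exact (ih rest (by simp at h; omega) (fun x hx => hf x (by simp [hx])) r line (col + 1) b c).2 q

-- the single pass over glued lines computes A's per-line fold
lemma mainRun : ∀ (ls : List (List Char)), ls ≠ [] → (∀ l ∈ ls, '\n' ∉ l) →
    ∀ (line : Int) (b : PySem.Set Int) (c : PySem.Dict Int Int),
    (∀ q, bRun (glue ls) line 0 0 q b c = aLoop ls line none b c) ∧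
    (∀ q, bRun (glue ls) line 0 2 q b c = aLoop ls line (some q) b c) := by
  intro ls
  induction ls with
  | nil => intro hne; exact absurd rfl hne
  | cons l ls' ih =>
    intro _ hf line b c
    have hlf : ∀ x ∈ l, x ≠ '\n' := fun x hx hc => hf l (by simp) (hc ▸ hx)
    cases ls' with
    | nil =>
      constructor
      · intro q
        rw [show glue [l] = l from rfl]
        rw [(endRun l.length l le_rfl hlf line 0 b c).1 q]
        simp [aLoop]
      · intro q
        rw [show glue [l] = l from rfl]
        rw [instrEnd l.length l le_rfl hlf line 0 q b c]
        cases hsc : scanClose q l 0 with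
        | some cc => simp [aLoop, hsc]
        | none => simp [aLoop, hsc]
    | cons l2 ls2 =>
      have hne2 : (l2 :: ls2) ≠ [] := by simp
      have hf2 : ∀ x ∈ l2 :: ls2, '\n' ∉ x := fun x hx => hf x (by simp [hx])
      constructor
      · intro q
        rw [show glue (l :: l2 :: ls2) = l ++ '\n' :: glue (l2 :: ls2) from rfl]
        rw [(nlRun l.length l le_rfl hlf (glue (l2 :: ls2)) line 0 b c).1 q]
        cases hso : scanOpen l with
        | none =>
          simp only
          rw [(ih hne2 hf2 (line + 1) b c).1 q]
          simp [aLoop, hso]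
        | some qq =>
          simp only
          rw [(ih hne2 hf2 (line + 1) b c).2 qq]
          simp [aLoop, hso]
      · intro q
        rw [show glue (l :: l2 :: ls2) = l ++ '\n' :: glue (l2 :: ls2) from rfl]
        rw [instrNL l.length l le_rfl hlf (glue (l2 :: ls2)) line 0 q b c]
        cases hsc : scanClose q l 0 with
        | some cc =>
          simp only
          rw [(ih hne2 hf2 (line + 1) b (c.insert line cc)).1 q]
          simp [aLoop, hsc]
        | none =>
          simp only
          rw [(ih hne2 hf2 (line + 1) (PySem.Set.add b line) c).2 q]
          simp [aLoop, hsc]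


-- ===== VERDICT (by name: the statement is the Claim_ definition above) =====
theorem scan_multiline_string_lines_spec : Claim_equal_scan_multiline_string_lines := by
  intro cmd _
  unfold Spec_scan_multiline_string_lines scan_multiline_string_lines scan_multiline_string_lines_alt
  rw [splitOn_eq_mySplit]
  have h := (mainRun (mySplit cmd.toList) (mySplit_ne_nil _) (mySplit_nlfree _)
      0 PySem.Set.empty PySem.Dict.empty).1 (Char.ofNat 0)
  rw [glue_mySplit] at h
  exact h.symm
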